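-- pv_equiv track=rewrite | github.com/DeepFriedCyber/TopologicalCartesianDB | tests/test_simple_two_phase.py | _distribute_to_cubes
-- ===== SOURCE A (Python) =====
-- from typing import Dict, List, Any, Tuple
--
-- def _distribute_to_cubes(documents: List[str]) -> Dict[str, int]:
--     """Simulate intelligent cube distribution"""
--     distribution = {'medical': 0, 'financial': 0, 'technical': 0, 'scientific': 0, 'general': 0}
--
--     for doc in documents:
--         doc_lower = doc.lower()
--         if any(term in doc_lower for term in ['medical', 'health', 'clinical', 'patient']):
--             distribution['medical'] += 1
--         elif any(term in doc_lower for term in ['financial', 'investment', 'market', 'portfolio']):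
--             distribution['financial'] += 1
--         elif any(term in doc_lower for term in ['technical', 'software', 'algorithm', 'computing']):
--             distribution['technical'] += 1
--         elif any(term in doc_lower for term in ['research', 'scientific', 'study', 'quantum']):
--             distribution['scientific'] += 1
--         else:
--             distribution['general'] += 1
--
--     return distribution
-- ===== SOURCE B (Python) =====
-- def _distribute_to_cubes(documents):
--     """Staged sieve: lowercase all docs once, then for each category in priority
--     order count and remove its matches from the pool; the leftover pool is 'general'."""
--     table = [
--         ('medical', ['medical', 'health', 'clinical', 'patient']),
--         ('financial', ['financial', 'investment', 'market', 'portfolio']),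
--         ('technical', ['technical', 'software', 'algorithm', 'computing']),
--         ('scientific', ['research', 'scientific', 'study', 'quantum']),
--     ]
--     pool = [d.lower() for d in documents]
--     distribution = {}
--     for cat, kws in table:
--         matched = [d for d in pool if any(t in d for t in kws)]
--         pool = [d for d in pool if not any(t in d for t in kws)]
--         distribution[cat] = len(matched)
--     distribution['general'] = len(pool)
--     return distribution
-- ===== Notes on version B (the rewrite author's own statement) =====
-- stated objective: alternative
-- what changed: Replaces A's single pass with per-document if/elif classification and dict mutation by a staged sieve: the pool of lowercased documents is filtered once per category in priority order, each category's count being the matches removed at its stage, and the leftover pool is 'general'.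
import Mathlib
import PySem

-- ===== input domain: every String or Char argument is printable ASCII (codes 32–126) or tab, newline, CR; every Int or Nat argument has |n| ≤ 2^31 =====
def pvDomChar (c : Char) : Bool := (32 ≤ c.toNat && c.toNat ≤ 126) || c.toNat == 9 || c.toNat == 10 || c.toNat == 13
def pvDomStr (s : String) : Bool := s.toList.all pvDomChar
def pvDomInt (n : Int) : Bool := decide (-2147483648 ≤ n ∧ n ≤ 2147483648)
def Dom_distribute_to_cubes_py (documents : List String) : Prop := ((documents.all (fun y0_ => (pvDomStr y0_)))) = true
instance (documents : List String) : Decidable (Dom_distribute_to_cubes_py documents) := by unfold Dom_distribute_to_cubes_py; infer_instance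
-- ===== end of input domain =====

-- B replaces A's per-document if/elif classification of a mutated counter dict by a staged
-- sieve over a pool of lowercased documents: each category in priority order counts and
-- removes its matches from the pool, the leftover pool being 'general' (alternative).

-- ===== PORT A =====
def distribute_to_cubes_py (documents : List String) : List (String × Int) :=
  let distribution : PySem.Dict String Int :=
    PySem.Dict.mk [("medical", 0), ("financial", 0), ("technical", 0), ("scientific", 0), ("general", 0)]
  let final := documents.foldl (fun distribution doc =>
    let doc_lower := PySem.Str.lower doc
    if ["medical", "health", "clinical", "patient"].any (fun term => PySem.Str.isIn term doc_lower) then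
      distribution.modify "medical" 0 (· + 1)
    else if ["financial", "investment", "market", "portfolio"].any (fun term => PySem.Str.isIn term doc_lower) then
      distribution.modify "financial" 0 (· + 1)
    else if ["technical", "software", "algorithm", "computing"].any (fun term => PySem.Str.isIn term doc_lower) then
      distribution.modify "technical" 0 (· + 1)
    else if ["research", "scientific", "study", "quantum"].any (fun term => PySem.Str.isIn term doc_lower) then
      distribution.modify "scientific" 0 (· + 1)
    else
      distribution.modify "general" 0 (· + 1)) distribution
  final.items

-- ===== PORT B =====
def pvTable : List (String × List String) :=
  [("medical", ["medical", "health", "clinical", "patient"]),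
   ("financial", ["financial", "investment", "market", "portfolio"]),
   ("technical", ["technical", "software", "algorithm", "computing"]),
   ("scientific", ["research", "scientific", "study", "quantum"])]

def distribute_to_cubes_py_alt (documents : List String) : List (String × Int) :=
  let pool0 := documents.map (fun d => PySem.Str.lower d)
  let st := pvTable.foldl (fun (st : List String × List (String × Int)) p =>
      let matched := st.1.filter (fun d => p.2.any (fun t => PySem.Str.isIn t d))
      let pool := st.1.filter (fun d => !(p.2.any (fun t => PySem.Str.isIn t d)))
      (pool, st.2 ++ [(p.1, (matched.length : Int))])) (pool0, [])
  st.2 ++ [("general", (st.1.length : Int))]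

-- ===== PRECONDITION & SPEC =====
def Spec_distribute_to_cubes_py (documents : List String) (out : List (String × Int)) : Prop := out = distribute_to_cubes_py_alt documents
instance (documents : List String) (out : List (String × Int)) : Decidable (Spec_distribute_to_cubes_py documents out) := by unfold Spec_distribute_to_cubes_py; infer_instance

-- ===== CLAIM (what is proved, stated in full; the proofs are below) =====
def Claim_equal_distribute_to_cubes_py : Prop := ∀ (documents : List String), Dom_distribute_to_cubes_py documents → Spec_distribute_to_cubes_py documents (distribute_to_cubes_py documents)

-- ===== LEMMAS AND PROOFS =====

-- proof-only names for the four category predicates (on already-lowered strings)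
def pvM1 (d : String) : Bool := ["medical", "health", "clinical", "patient"].any (fun t => PySem.Str.isIn t d)
def pvM2 (d : String) : Bool := ["financial", "investment", "market", "portfolio"].any (fun t => PySem.Str.isIn t d)
def pvM3 (d : String) : Bool := ["technical", "software", "algorithm", "computing"].any (fun t => PySem.Str.isIn t d)
def pvM4 (d : String) : Bool := ["research", "scientific", "study", "quantum"].any (fun t => PySem.Str.isIn t d)

-- A's loop starting from arbitrary counts adds, per category, the size of B's sieve stage.
theorem pv_loop (docs : List String) (m f t s g : Int) :
    docs.foldl (fun distribution doc =>
      let doc_lower := PySem.Str.lower doc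
      if ["medical", "health", "clinical", "patient"].any (fun term => PySem.Str.isIn term doc_lower) then
        distribution.modify "medical" 0 (· + 1)
      else if ["financial", "investment", "market", "portfolio"].any (fun term => PySem.Str.isIn term doc_lower) then
        distribution.modify "financial" 0 (· + 1)
      else if ["technical", "software", "algorithm", "computing"].any (fun term => PySem.Str.isIn term doc_lower) then
        distribution.modify "technical" 0 (· + 1)
      else if ["research", "scientific", "study", "quantum"].any (fun term => PySem.Str.isIn term doc_lower) then
        distribution.modify "scientific" 0 (· + 1)
      else
        distribution.modify "general" 0 (· + 1))
      (PySem.Dict.mk [("medical", m), ("financial", f), ("technical", t), ("scientific", s), ("general", g)])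
    = (let L := docs.map (fun d => PySem.Str.lower d)
       let L1 := L.filter (fun d => !pvM1 d)
       let L2 := L1.filter (fun d => !pvM2 d)
       let L3 := L2.filter (fun d => !pvM3 d)
       let L4 := L3.filter (fun d => !pvM4 d)
       PySem.Dict.mk
        [("medical", m + ((L.filter (fun d => pvM1 d)).length : Int)),
         ("financial", f + ((L1.filter (fun d => pvM2 d)).length : Int)),
         ("technical", t + ((L2.filter (fun d => pvM3 d)).length : Int)),
         ("scientific", s + ((L3.filter (fun d => pvM4 d)).length : Int)),
         ("general", g + (L4.length : Int))]) := by
  induction docs generalizing m f t s g with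
  | nil => simp
  | cons doc docs ih =>
    simp only [List.foldl_cons, List.map_cons]
    by_cases h1 : pvM1 (PySem.Str.lower doc) = true
    · have h1' := h1; unfold pvM1 at h1'
      simp only [h1', reduceIte]
      rw [show ((PySem.Dict.mk [("medical", m), ("financial", f), ("technical", t), ("scientific", s), ("general", g)]).modify "medical" 0 (· + 1))
          = PySem.Dict.mk [("medical", m + 1), ("financial", f), ("technical", t), ("scientific", s), ("general", g)] by
        simp [PySem.Dict.modify, PySem.Dict.insert, PySem.Dict.getD, PySem.Dict.get?, PySem.Dict.contains]]
      rw [ih]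
      simp only [List.filter_cons, h1, Bool.not_true, if_true, if_false, Bool.false_eq_true,
        List.length_cons, PySem.Dict.mk.injEq, List.cons.injEq, Prod.mk.injEq, and_true, true_and]
      push_cast; omega
    · rw [Bool.not_eq_true] at h1
      have h1' := h1; unfold pvM1 at h1'
      by_cases h2 : pvM2 (PySem.Str.lower doc) = true
      · have h2' := h2; unfold pvM2 at h2'
        simp only [h1', h2', Bool.false_eq_true, if_false, reduceIte]
        rw [show ((PySem.Dict.mk [("medical", m), ("financial", f), ("technical", t), ("scientific", s), ("general", g)]).modify "financial" 0 (· + 1))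
            = PySem.Dict.mk [("medical", m), ("financial", f + 1), ("technical", t), ("scientific", s), ("general", g)] by
          simp [PySem.Dict.modify, PySem.Dict.insert, PySem.Dict.getD, PySem.Dict.get?, PySem.Dict.contains]]
        rw [ih]
        simp only [List.filter_cons, h1, h2, Bool.not_true, Bool.not_false, if_true, if_false,
          Bool.false_eq_true, List.length_cons, PySem.Dict.mk.injEq, List.cons.injEq,
          Prod.mk.injEq, and_true, true_and]
        push_cast; omega
      · rw [Bool.not_eq_true] at h2
        have h2' := h2; unfold pvM2 at h2'
        by_cases h3 : pvM3 (PySem.Str.lower doc) = true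
        · have h3' := h3; unfold pvM3 at h3'
          simp only [h1', h2', h3', Bool.false_eq_true, if_false, reduceIte]
          rw [show ((PySem.Dict.mk [("medical", m), ("financial", f), ("technical", t), ("scientific", s), ("general", g)]).modify "technical" 0 (· + 1))
              = PySem.Dict.mk [("medical", m), ("financial", f), ("technical", t + 1), ("scientific", s), ("general", g)] by
            simp [PySem.Dict.modify, PySem.Dict.insert, PySem.Dict.getD, PySem.Dict.get?, PySem.Dict.contains]]
          rw [ih]
          simp only [List.filter_cons, h1, h2, h3, Bool.not_true, Bool.not_false, if_true, if_false,
            Bool.false_eq_true, List.length_cons, PySem.Dict.mk.injEq, List.cons.injEq,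
            Prod.mk.injEq, and_true, true_and]
          push_cast; omega
        · rw [Bool.not_eq_true] at h3
          have h3' := h3; unfold pvM3 at h3'
          by_cases h4 : pvM4 (PySem.Str.lower doc) = true
          · have h4' := h4; unfold pvM4 at h4'
            simp only [h1', h2', h3', h4', Bool.false_eq_true, if_false, reduceIte]
            rw [show ((PySem.Dict.mk [("medical", m), ("financial", f), ("technical", t), ("scientific", s), ("general", g)]).modify "scientific" 0 (· + 1))
                = PySem.Dict.mk [("medical", m), ("financial", f), ("technical", t), ("scientific", s + 1), ("general", g)] by
              simp [PySem.Dict.modify, PySem.Dict.insert, PySem.Dict.getD, PySem.Dict.get?, PySem.Dict.contains]]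
            rw [ih]
            simp only [List.filter_cons, h1, h2, h3, h4, Bool.not_true, Bool.not_false, if_true,
              if_false, Bool.false_eq_true, List.length_cons, PySem.Dict.mk.injEq, List.cons.injEq,
              Prod.mk.injEq, and_true, true_and]
            push_cast; omega
          · rw [Bool.not_eq_true] at h4
            have h4' := h4; unfold pvM4 at h4'
            simp only [h1', h2', h3', h4', Bool.false_eq_true, if_false]
            rw [show ((PySem.Dict.mk [("medical", m), ("financial", f), ("technical", t), ("scientific", s), ("general", g)]).modify "general" 0 (· + 1))
                = PySem.Dict.mk [("medical", m), ("financial", f), ("technical", t), ("scientific", s), ("general", g + 1)] by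
              simp [PySem.Dict.modify, PySem.Dict.insert, PySem.Dict.getD, PySem.Dict.get?, PySem.Dict.contains]]
            rw [ih]
            simp only [List.filter_cons, h1, h2, h3, h4, Bool.not_false, if_true,
              if_false, Bool.false_eq_true, List.length_cons, PySem.Dict.mk.injEq, List.cons.injEq,
              Prod.mk.injEq, and_true, true_and]
            push_cast; omega

-- ===== VERDICT (by name: the statement is the Claim_ definition above) =====
theorem distribute_to_cubes_py_spec : Claim_equal_distribute_to_cubes_py := by
  intro documents _
  unfold Spec_distribute_to_cubes_py distribute_to_cubes_py distribute_to_cubes_py_alt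
  dsimp only
  rw [pv_loop]
  simp [pvTable, pvM1, pvM2, pvM3, pvM4]
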